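-- pv_equiv track=rewrite | github.com/ViniciusRaphael/crypto_technical_analysis | scripts/utils/indicators_util.py | classify_adx_value
-- ===== SOURCE A (Python) =====
-- def classify_adx_value(value):
--     """
--     Checks the ADX value against predefined ranges and returns the corresponding trend category.
--
--     Args:
--         value (int): The ADX value to be categorized.
--
--     Returns:
--         str or None: The category name for the provided ADX value.
--     """
--     NM_ADX_GROUP = {
--         '0-25': '1. Absent or Weak Trend',
--         '25-50': '2. Strong Trend',
--         '50-75': '3. Very Strong Trend',
--         '75-100': '4. Extremely Strong Trend'
--     }
--
--     for key, name in NM_ADX_GROUP.items():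
--         range_start, range_end = map(int, key.split('-'))
--         if range_start <= value <= range_end:
--             return name
--     return None
-- ===== SOURCE B (Python) =====
-- def classify_adx_value(value):
--     """Same classification via direct threshold branching (no dict/string parsing)."""
--     if value < 0 or value > 100:
--         return None
--     if value <= 25:
--         return '1. Absent or Weak Trend'
--     if value <= 50:
--         return '2. Strong Trend'
--     if value <= 75:
--         return '3. Very Strong Trend'
--     return '4. Extremely Strong Trend'
-- ===== Notes on version B (the rewrite author's own statement) =====
-- stated objective: simpler
-- what changed: Replaced the dict of 'a-b' range strings with its split/int parsing loop by a direct one-sided if/elif threshold chain.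
import Mathlib
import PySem

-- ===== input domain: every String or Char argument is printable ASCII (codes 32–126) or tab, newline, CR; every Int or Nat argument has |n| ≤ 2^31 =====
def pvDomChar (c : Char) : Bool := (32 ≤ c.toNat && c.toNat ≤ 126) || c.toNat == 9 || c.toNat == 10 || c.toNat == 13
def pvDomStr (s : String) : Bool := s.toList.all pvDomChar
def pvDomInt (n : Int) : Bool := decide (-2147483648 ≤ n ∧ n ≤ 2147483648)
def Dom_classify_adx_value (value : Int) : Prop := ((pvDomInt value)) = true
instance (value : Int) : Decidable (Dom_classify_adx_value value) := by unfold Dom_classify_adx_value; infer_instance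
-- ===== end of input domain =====

-- B replaces A's dict of "a-b" range strings and its parsing loop by a direct threshold if-chain (simpler).

-- ===== PORT A =====
-- the NM_ADX_GROUP dict literal (insertion order)
def pvAdxGroup : List (String × String) :=
  [("0-25", "1. Absent or Weak Trend"),
   ("25-50", "2. Strong Trend"),
   ("50-75", "3. Very Strong Trend"),
   ("75-100", "4. Extremely Strong Trend")]

-- range_start, range_end = map(int, key.split('-')); none = that unpacking would raise (never on the literal keys)
def pvParseRange (key : String) : Option (Int × Int) :=
  match (PySem.Str.split? key "-").map (List.map PySem.Int.ofStr?) with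
  | some [some a, some b] => some (a, b)
  | _ => none

def pvGoA (value : Int) : List (String × String) → Option String
  | [] => none
  | (key, name) :: rest =>
    match pvParseRange key with
    | some (range_start, range_end) =>
        if range_start ≤ value ∧ value ≤ range_end then some name else pvGoA value rest
    | none => none

def classify_adx_value (value : Int) : Option String := pvGoA value pvAdxGroup

-- ===== PORT B =====
def classify_adx_value_alt (value : Int) : Option String :=
  if value < 0 ∨ value > 100 then none
  else if value ≤ 25 then some "1. Absent or Weak Trend"
  else if value ≤ 50 then some "2. Strong Trend"
  else if value ≤ 75 then some "3. Very Strong Trend"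
  else some "4. Extremely Strong Trend"

-- ===== PRECONDITION & SPEC =====
def Spec_classify_adx_value (value : Int) (out : Option String) : Prop := out = classify_adx_value_alt value
instance (value : Int) (out : Option String) : Decidable (Spec_classify_adx_value value out) := by unfold Spec_classify_adx_value; infer_instance

-- ===== CLAIM (what is proved, stated in full; the proofs are below) =====
def Claim_equal_classify_adx_value : Prop := ∀ (value : Int), Dom_classify_adx_value value → Spec_classify_adx_value value (classify_adx_value value)

-- ===== LEMMAS AND PROOFS =====
theorem pvParse1 : pvParseRange "0-25" = some (0, 25) := by decide
theorem pvParse2 : pvParseRange "25-50" = some (25, 50) := by decide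
theorem pvParse3 : pvParseRange "50-75" = some (50, 75) := by decide
theorem pvParse4 : pvParseRange "75-100" = some (75, 100) := by decide

-- ===== VERDICT (by name: the statement is the Claim_ definition above) =====
theorem classify_adx_value_spec : Claim_equal_classify_adx_value := by
  intro value _
  unfold Spec_classify_adx_value classify_adx_value classify_adx_value_alt pvAdxGroup
  simp only [pvGoA, pvParse1, pvParse2, pvParse3, pvParse4]
  split_ifs <;> first | rfl | omega
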